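-- pv_equiv track=rewrite | github.com/seismoMSL/AmPHIB | src/py_src/Utils/cnv.py | _get_nonadjacent_blanklines
-- ===== SOURCE A (Python) =====
-- def _get_nonadjacent_blanklines(content):
--     """
--     Get location of all non-adjacent blanklines in the CNV file.
--
--     Parameters:
--     -----------
--     content : list
--         Content of the CNV file as a list of strs for each line.
--
--     Returns:
--     --------
--     blanklines : list
--         List of all non-adjacent blank line numbers.
--
--     """
--     blanklines = []
--     prev = None
--
--     for line_n, line in enumerate(content):
--         if not line.strip() and line_n - 1 != prev:
--             blanklines.append(line_n)
--             prev = line_n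
--
--     return blanklines
-- ===== SOURCE B (Python) =====
-- def _get_nonadjacent_blanklines(content):
--     res = []
--     i, n = 0, len(content)
--     while i < n:
--         if content[i].strip():
--             i += 1
--         else:
--             j = i + 1
--             while j < n and not content[j].strip():
--                 j += 1
--             res.extend(range(i, j, 2))
--             i = j
--     return res
-- ===== Notes on version B (the rewrite author's own statement) =====
-- stated objective: alternative
-- what changed: Replaces the stateful line-by-line scan with a prev marker by a run-grouping scan: maximal runs of consecutive blank lines are located and every other index of each run (range(start, end, 2)) is emitted in bulk.
import Mathlib
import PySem

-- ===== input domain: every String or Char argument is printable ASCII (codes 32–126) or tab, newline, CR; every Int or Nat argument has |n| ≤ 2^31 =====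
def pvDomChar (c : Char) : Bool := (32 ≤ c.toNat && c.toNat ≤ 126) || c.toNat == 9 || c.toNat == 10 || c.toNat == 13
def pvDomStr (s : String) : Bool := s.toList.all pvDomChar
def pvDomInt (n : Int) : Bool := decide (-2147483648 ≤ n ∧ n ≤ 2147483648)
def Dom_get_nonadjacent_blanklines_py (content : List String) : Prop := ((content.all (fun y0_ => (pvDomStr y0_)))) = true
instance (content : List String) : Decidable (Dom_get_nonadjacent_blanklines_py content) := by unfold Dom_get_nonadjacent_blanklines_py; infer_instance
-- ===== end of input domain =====

-- B groups maximal runs of blank lines and emits every other index of each run, instead of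
-- A's line-by-line scan with a 'previously appended' marker; same cost, different traversal.

-- blank test: Python's `not line.strip()`
def pvBlank (s : String) : Bool := PySem.Str.strip s == ""

-- ===== PORT A =====
def get_nonadjacent_blanklines_py (content : List String) : List Int :=
  ((PySem.List.enumerate content).foldl
    (fun (st : List Int × Option Int) (p : Int × String) =>
      if pvBlank p.2 && (st.2 != some (p.1 - 1)) then (st.1 ++ [p.1], some p.1) else st)
    ([], none)).1

-- ===== PORT B =====
-- outer while over the index; the inner while scanning the blank run is the takeWhile
def pvGoB : List String → Int → List Int
  | [], _ => []
  | l :: ls, i =>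
    if pvBlank l then
      pvGoB (ls.drop (ls.takeWhile pvBlank).length) (i + 1 + ((ls.takeWhile pvBlank).length : Int))
      |> (PySem.List.pyRange i (i + 1 + ((ls.takeWhile pvBlank).length : Int)) 2 ++ ·)
    else pvGoB ls (i + 1)
termination_by ls _ => ls.length
decreasing_by
  · exact Nat.lt_succ_of_le (Nat.le_trans (List.length_drop ▸ Nat.sub_le _ _) (Nat.le_refl _))
  · exact Nat.lt_succ_self _

def get_nonadjacent_blanklines_py_alt (content : List String) : List Int :=
  pvGoB content 0

-- ===== PRECONDITION & SPEC =====
def Spec_get_nonadjacent_blanklines_py (content : List String) (out : List Int) : Prop := out = get_nonadjacent_blanklines_py_alt content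
instance (content : List String) (out : List Int) : Decidable (Spec_get_nonadjacent_blanklines_py content out) := by unfold Spec_get_nonadjacent_blanklines_py; infer_instance

-- ===== CLAIM (what is proved, stated in full; the proofs are below) =====
def Claim_equal_get_nonadjacent_blanklines_py : Prop := ∀ (content : List String), Dom_get_nonadjacent_blanklines_py content → Spec_get_nonadjacent_blanklines_py content (get_nonadjacent_blanklines_py content)

-- ===== LEMMAS AND PROOFS =====

-- A's loop as a structural recursion (its fold, unrolled)
def pvGoA : List String → Int → Option Int → List Int
  | [], _, _ => []
  | l :: ls, i, prev =>
    if pvBlank l && (prev != some (i - 1)) then i :: pvGoA ls (i + 1) (some i)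
    else pvGoA ls (i + 1) prev

lemma pvFoldA (ls : List String) : ∀ (i : Int) (acc : List Int) (prev : Option Int),
    ((PySem.List.enumerate ls i).foldl
      (fun (st : List Int × Option Int) (p : Int × String) =>
        if pvBlank p.2 && (st.2 != some (p.1 - 1)) then (st.1 ++ [p.1], some p.1) else st)
      (acc, prev)).1 = acc ++ pvGoA ls i prev := by
  induction ls with
  | nil => intro i acc prev; simp [PySem.List.enumerate, pvGoA]
  | cons l ls ih =>
    intro i acc prev
    rw [PySem.List.enumerate_cons, List.foldl_cons, pvGoA]
    by_cases h : (pvBlank l && (prev != some (i - 1))) = true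
    · rw [if_pos h, ih, if_pos h]
      simp
    · rw [if_neg h, ih, if_neg h]

-- the intermediate form: after appending a blank index, the next line is skipped outright
def pvGoC : List String → Int → List Int
  | [], _ => []
  | [l], i => if pvBlank l then [i] else []
  | l :: l2 :: ls, i =>
    if pvBlank l then i :: pvGoC ls (i + 2) else pvGoC (l2 :: ls) (i + 1)

lemma pvGoA_skip (l : String) (ls : List String) (i : Int) :
    pvGoA (l :: ls) (i + 1) (some i) = pvGoA ls (i + 2) (some i) := by
  rw [pvGoA]
  have h : (some i != some (i + 1 - 1)) = false := by
    simp only [bne_eq_false_iff_eq, Option.some.injEq]; omega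
  rw [h, Bool.and_false, if_neg (by simp)]
  have e : i + 1 + 1 = i + 2 := by ring
  rw [e]

lemma pvAC : ∀ (n : Nat) (ls : List String) (i : Int) (prev : Option Int),
    ls.length ≤ n → (prev = none ∨ ∃ p, prev = some p ∧ p ≤ i - 2) →
    pvGoA ls i prev = pvGoC ls i := by
  intro n
  induction n with
  | zero =>
    intro ls i prev h _
    cases ls with
    | nil => rfl
    | cons l ls => simp at h
  | succ n ih =>
    intro ls i prev hlen hprev
    cases ls with
    | nil => rfl
    | cons l ls =>
      have hne : (prev != some (i - 1)) = true := by
        rcases hprev with h | ⟨p, rfl, hp⟩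
        · simp [h]
        · simp only [bne_iff_ne, ne_eq, Option.some.injEq]; omega
      cases ls with
      | nil =>
        by_cases hb : pvBlank l = true
        · simp [pvGoA, pvGoC, hb, hne]
        · simp [pvGoA, pvGoC, hb]
      | cons l2 ls2 =>
        by_cases hb : pvBlank l = true
        · rw [pvGoA, if_pos (by rw [hb, hne]; rfl), pvGoA_skip,
            ih ls2 (i + 2) (some i) (by simp at hlen ⊢; omega) (Or.inr ⟨i, rfl, by omega⟩)]
          simp [pvGoC, hb]
        · have hb' : (pvBlank l && (prev != some (i - 1))) = false := by simp [hb]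
          rw [pvGoA, if_neg (by simp [hb'])]
          rw [ih (l2 :: ls2) (i + 1) prev (by simp at hlen ⊢; omega)]
          · simp [pvGoC, hb]
          · rcases hprev with h | ⟨p, rfl, hp⟩
            · exact Or.inl h
            · exact Or.inr ⟨p, rfl, by omega⟩

lemma pvRange2_nil {a b : Int} (h : b ≤ a) : PySem.List.pyRange a b 2 = [] := by
  rw [PySem.List.pyRange_of_pos a b (by norm_num)]
  simp [if_neg (by omega : ¬ a < b)]

lemma pvRange2_cons {a b : Int} (h : a < b) :
    PySem.List.pyRange a b 2 = a :: PySem.List.pyRange (a + 2) b 2 := by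
  rw [PySem.List.pyRange_of_pos a b (by norm_num),
      PySem.List.pyRange_of_pos (a + 2) b (by norm_num)]
  have hcount : (if a < b then ((b - a + 2 - 1) / 2).toNat else 0)
      = (if a + 2 < b then ((b - (a + 2) + 2 - 1) / 2).toNat else 0) + 1 := by
    split_ifs <;> omega
  rw [hcount, List.range_succ_eq_map]
  simp only [List.map_cons, List.map_map]
  congr 1
  · simp
  · apply List.map_congr_left
    intro k _
    simp only [Function.comp_apply]
    push_cast; ring

-- for every list, B's value is 'the leading run, strided by 2, then B on the rest'
lemma pvRunB (ls : List String) (i : Int) :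
    pvGoB ls i = PySem.List.pyRange i (i + ((ls.takeWhile pvBlank).length : Int)) 2
      ++ pvGoB (ls.drop (ls.takeWhile pvBlank).length) (i + ((ls.takeWhile pvBlank).length : Int)) := by
  cases ls with
  | nil => simp [pvGoB, pvRange2_nil (le_refl i)]
  | cons l ls =>
    by_cases hb : pvBlank l = true
    · rw [pvGoB, if_pos hb]
      simp only [List.takeWhile_cons, hb, if_true, List.length_cons, List.drop_succ_cons]
      have : i + ((ls.takeWhile pvBlank).length + 1 : Nat) = i + 1 + ((ls.takeWhile pvBlank).length : Int) := by
        push_cast; ring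
      rw [this]
    · rw [pvGoB, if_neg hb]
      simp only [List.takeWhile_cons, hb]
      simp [pvRange2_nil (le_refl i), pvGoB, if_neg hb]

lemma pvCB : ∀ (n : Nat) (ls : List String) (i : Int),
    ls.length ≤ n → pvGoC ls i = pvGoB ls i := by
  intro n
  induction n with
  | zero =>
    intro ls i h
    cases ls with
    | nil => simp [pvGoC, pvGoB]
    | cons l ls => simp at h
  | succ n ih =>
    intro ls i hlen
    cases ls with
    | nil => simp [pvGoC, pvGoB]
    | cons l ls =>
      by_cases hb : pvBlank l = true
      · rw [pvGoB, if_pos hb]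
        cases ls with
        | nil =>
          simp only [pvGoC, hb, List.takeWhile_nil, List.length_nil,
            Nat.cast_zero, add_zero, List.drop_nil, pvGoB]
          rw [pvRange2_cons (by omega), pvRange2_nil (by omega)]
          simp
        | cons l2 ls2 =>
          rw [pvGoC, if_pos hb]
          by_cases hb2 : pvBlank l2 = true
          · simp only [List.takeWhile_cons, hb2, if_true, List.length_cons,
              List.drop_succ_cons]
            have harith : i + 1 + (((ls2.takeWhile pvBlank).length + 1 : Nat) : Int)
                = i + 2 + ((ls2.takeWhile pvBlank).length : Int) := by push_cast; ring
            rw [harith, pvRange2_cons (by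
              have : (0:Int) ≤ ((ls2.takeWhile pvBlank).length : Int) := by positivity
              omega)]
            have e2 : i + 2 + ((ls2.takeWhile pvBlank).length : Int)
                = (i + 2) + ((ls2.takeWhile pvBlank).length : Int) := by ring
            rw [List.cons_append, e2, ← pvRunB ls2 (i + 2),
              ih ls2 (i + 2) (by simp at hlen ⊢; omega)]
          · have hb2' : pvBlank l2 = false := by simpa using hb2
            simp only [List.takeWhile_cons, hb2', Bool.false_eq_true, if_false,
              List.length_nil, Nat.cast_zero, add_zero, List.drop_zero]
            rw [pvRange2_cons (by omega), pvRange2_nil (by omega), pvGoB,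
              if_neg (by simp [hb2'])]
            have e : i + 1 + 1 = i + 2 := by ring
            rw [e, ih ls2 (i + 2) (by simp at hlen ⊢; omega)]
            simp
      · rw [pvGoB, if_neg hb]
        cases ls with
        | nil => simp [pvGoC, hb, pvGoB]
        | cons l2 ls2 =>
          rw [pvGoC, if_neg hb]
          exact ih _ _ (by simp at hlen ⊢; omega)

-- ===== VERDICT (by name: the statement is the Claim_ definition above) =====
theorem get_nonadjacent_blanklines_py_spec : Claim_equal_get_nonadjacent_blanklines_py := by
  intro content _
  unfold Spec_get_nonadjacent_blanklines_py get_nonadjacent_blanklines_py get_nonadjacent_blanklines_py_alt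
  rw [pvFoldA content 0 [] none, List.nil_append,
      pvAC content.length content 0 none (le_refl _) (Or.inl rfl),
      pvCB content.length content 0 (le_refl _)]
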